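-- pv_equiv track=rewrite | github.com/morphocluster/morphocluster | morphocluster/tree.py | _paths_to_node_order
-- ===== SOURCE A (Python) =====
-- def _paths_to_node_order(paths):
--     """
--     TODO: Returns nodes from list of paths in bottom-up order.
--
--     Pop last element of longest path. Do not duplicate existing nodes.
--     """
--
--     result = []
--
--     while True:
--         longest_path = max(paths, key=len)
--
--         if not longest_path:
--             break
--
--         node = longest_path.pop()
--
--         if node not in result:
--             result.append(node)
--
--     return result
-- ===== SOURCE B (Python) =====
-- def _paths_to_node_order(paths):
--     """
--     Returns nodes from list of paths in bottom-up order.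
--
--     Level-by-level: A repeatedly pops the last element of the first longest
--     path, which visits depth d = maxlen, maxlen-1, ..., 1, and within a depth
--     the paths in index order.  So emit paths[i][d-1] for d descending, for each
--     path long enough, deduplicating with a set.  (Unlike A, does not mutate
--     `paths`.)
--     """
--     maxlen = max(len(p) for p in paths)
--     result = []
--     seen = set()
--     for d in range(maxlen, 0, -1):
--         for p in paths:
--             if len(p) >= d:
--                 node = p[d - 1]
--                 if node not in seen:
--                     seen.add(node)
--                     result.append(node)
--     return result
-- ===== Notes on version B (the rewrite author's own statement) =====
-- stated objective: faster
-- what changed: Instead of repeatedly rescanning all paths for the longest one and the result list for membership, B observes that A pops depth levels maxlen..1 in index order, so it emits paths[i][d-1] for d descending in a single double loop with a set for O(1) deduplication; B also does not mutate the input lists.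
-- outside the precondition, e.g. on _paths_to_node_order([]): A raises ValueError, B raises ValueError
import Mathlib
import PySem

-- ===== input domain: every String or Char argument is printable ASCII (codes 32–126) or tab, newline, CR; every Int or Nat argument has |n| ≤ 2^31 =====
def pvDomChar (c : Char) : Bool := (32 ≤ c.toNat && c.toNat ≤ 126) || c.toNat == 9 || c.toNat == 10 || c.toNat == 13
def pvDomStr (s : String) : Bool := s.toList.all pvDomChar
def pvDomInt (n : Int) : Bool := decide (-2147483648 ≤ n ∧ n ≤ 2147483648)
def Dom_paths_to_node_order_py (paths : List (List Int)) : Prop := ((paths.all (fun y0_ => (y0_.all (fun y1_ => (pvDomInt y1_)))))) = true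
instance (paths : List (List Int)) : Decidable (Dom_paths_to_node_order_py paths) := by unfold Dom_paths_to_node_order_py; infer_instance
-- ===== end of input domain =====

-- B pops nodes level by level from the original paths instead of A's repeated longest-path scan;
-- faster by avoiding the rescans, and (unlike A, which empties the inner lists) B does not mutate
-- its argument — the equivalence proved here is about the return value.

-- ===== PORT A =====
-- Python's `max(paths, key=len)` returns the FIRST path of maximal length; we model the chosen
-- object as (its length, first path having that length), and `longest_path.pop()` as replacing
-- that first maximal path by its dropLast inside `paths`, returning its last element.
def pyMaxLenA : List (List Int) → Nat
  | [] => 0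
  | p :: ps => ps.foldl (fun m q => max m q.length) p.length

-- pop the last element of the first path of length mx (mx > 0 and attained when called)
def popFirstA (mx : Nat) : List (List Int) → Int × List (List Int)
  | [] => (0, [])
  | p :: ps =>
    if p.length = mx then (p.getLastD 0, p.dropLast :: ps)
    else
      let r := popFirstA mx ps
      (r.1, p :: r.2)

def sumLenA (paths : List (List Int)) : Nat := (paths.map List.length).sum

-- the `while True` loop; each iteration removes one node, so sumLenA + 1 fuel always suffices
def aLoop : Nat → List (List Int) → List Int → List Int
  | 0, _, result => result
  | fuel + 1, paths, result =>
    let mx := pyMaxLenA paths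
    if mx = 0 then result
    else
      let r := popFirstA mx paths
      aLoop fuel r.2 (if r.1 ∈ result then result else result ++ [r.1])

def paths_to_node_order_py (paths : List (List Int)) : List Int :=
  aLoop (sumLenA paths + 1) paths []

-- ===== PORT B =====
def bMaxLen : List (List Int) → Nat
  | [] => 0
  | p :: ps => ps.foldl (fun m q => max m q.length) p.length

-- the inner `for p in paths` loop at level d; acc = (result, seen)
def bInner (paths : List (List Int)) (d : Int) (acc : List Int × PySem.Set Int) :
    List Int × PySem.Set Int :=
  paths.foldl (fun acc p =>
    if d ≤ (p.length : Int) then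
      match PySem.List.pyGet? p (d - 1) with
      | none => acc
      | some node =>
        if acc.2.contains node then acc else (acc.1 ++ [node], PySem.Set.add acc.2 node)
    else acc) acc

def paths_to_node_order_py_alt (paths : List (List Int)) : List Int :=
  ((PySem.List.pyRange (bMaxLen paths : Int) 0 (-1)).foldl
      (fun acc d => bInner paths d acc) ([], PySem.Set.empty)).1

-- ===== PRECONDITION & SPEC =====
-- Pre_ excludes only paths = [], where Python A raises ValueError (max() of an empty sequence);
-- B raises there too.
def Pre_paths_to_node_order_py (paths : List (List Int)) : Prop := paths ≠ []
instance (paths : List (List Int)) : Decidable (Pre_paths_to_node_order_py paths) := by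
  unfold Pre_paths_to_node_order_py; infer_instance

def pvWitness_paths_to_node_order_py : List (List Int) := [[1, 2], [3]]

def Spec_paths_to_node_order_py (paths : List (List Int)) (out : List Int) : Prop := out = paths_to_node_order_py_alt paths
instance (paths : List (List Int)) (out : List Int) : Decidable (Spec_paths_to_node_order_py paths out) := by unfold Spec_paths_to_node_order_py; infer_instance

-- ===== CLAIM (what is proved, stated in full; the proofs are below) =====
def Claim_equal_paths_to_node_order_py : Prop := ∀ (paths : List (List Int)), Dom_paths_to_node_order_py paths → Pre_paths_to_node_order_py paths → Spec_paths_to_node_order_py paths (paths_to_node_order_py paths)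

-- ===== LEMMAS AND PROOFS =====

theorem foldl_max_len (ps : List (List Int)) (a : Nat) :
    ps.foldl (fun m q => max m q.length) a = max a (pyMaxLenA ps) := by
  induction ps generalizing a with
  | nil => simp [pyMaxLenA]
  | cons q qs ih =>
    have e : pyMaxLenA (q :: qs) = qs.foldl (fun m q => max m q.length) q.length := rfl
    rw [List.foldl_cons, ih, e, ih q.length]
    omega

theorem pyMaxLenA_cons (p : List Int) (ps : List (List Int)) :
    pyMaxLenA (p :: ps) = max p.length (pyMaxLenA ps) :=
  foldl_max_len ps p.length

theorem le_pyMaxLenA {paths : List (List Int)} {p : List Int} (h : p ∈ paths) :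
    p.length ≤ pyMaxLenA paths := by
  induction paths with
  | nil => cases h
  | cons q qs ih =>
    rw [pyMaxLenA_cons]
    rcases List.mem_cons.mp h with h | h
    · subst h; omega
    · exact le_trans (ih h) (by omega)

theorem pyMaxLenA_le {paths : List (List Int)} {m : Nat}
    (h : ∀ p ∈ paths, p.length ≤ m) : pyMaxLenA paths ≤ m := by
  induction paths with
  | nil => simp [pyMaxLenA]
  | cons q qs ih =>
    rw [pyMaxLenA_cons]
    have h1 := h q (by simp)
    have h2 := ih (fun p hp => h p (by simp [hp]))
    omega

theorem pyMaxLenA_attained {paths : List (List Int)} (h : pyMaxLenA paths ≠ 0) :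
    ∃ p ∈ paths, p.length = pyMaxLenA paths := by
  induction paths with
  | nil => simp [pyMaxLenA] at h
  | cons q qs ih =>
    rw [pyMaxLenA_cons] at h ⊢
    by_cases hq : pyMaxLenA qs ≤ q.length
    · exact ⟨q, by simp, by omega⟩
    · obtain ⟨p, hp, hl⟩ := ih (by omega)
      exact ⟨p, by simp [hp], by omega⟩

theorem len_le_sumLen {paths : List (List Int)} {p : List Int} (h : p ∈ paths) :
    p.length ≤ sumLenA paths := by
  induction paths with
  | nil => cases h
  | cons q qs ih =>
    have : sumLenA (q :: qs) = q.length + sumLenA qs := by simp [sumLenA]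
    rcases List.mem_cons.mp h with h | h
    · subst h; omega
    · have := ih h; omega

theorem sumLen_popFirstA {mx : Nat} (hmx : mx ≠ 0) :
    ∀ paths : List (List Int), (∃ p ∈ paths, p.length = mx) →
      sumLenA (popFirstA mx paths).2 + 1 = sumLenA paths := by
  intro paths
  induction paths with
  | nil => rintro ⟨p, hp, -⟩; cases hp
  | cons q qs ih =>
    rintro ⟨p, hp, hl⟩
    by_cases hq : q.length = mx
    · have h1 : popFirstA mx (q :: qs) = (q.getLastD 0, q.dropLast :: qs) := by
        simp [popFirstA, hq]
      rw [h1]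
      show sumLenA (q.dropLast :: qs) + 1 = sumLenA (q :: qs)
      have h2 : sumLenA (q.dropLast :: qs) = q.dropLast.length + sumLenA qs := by simp [sumLenA]
      have h3 : sumLenA (q :: qs) = q.length + sumLenA qs := by simp [sumLenA]
      have h4 : q.dropLast.length = q.length - 1 := List.length_dropLast
      omega
    · have hp' : p ∈ qs := by
        rcases List.mem_cons.mp hp with h | h
        · exact absurd (h ▸ hl) hq
        · exact h
      have h1 : popFirstA mx (q :: qs) = ((popFirstA mx qs).1, q :: (popFirstA mx qs).2) := by
        simp [popFirstA, hq]
      rw [h1]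
      show sumLenA (q :: (popFirstA mx qs).2) + 1 = sumLenA (q :: qs)
      have := ih ⟨p, hp', hl⟩
      have h2 : sumLenA (q :: (popFirstA mx qs).2) = q.length + sumLenA (popFirstA mx qs).2 := by
        simp [sumLenA]
      have h3 : sumLenA (q :: qs) = q.length + sumLenA qs := by simp [sumLenA]
      omega

theorem aLoop_fuel : ∀ (f1 f2 : Nat) (paths : List (List Int)) (result : List Int),
    sumLenA paths ≤ f1 → sumLenA paths ≤ f2 →
    aLoop f1 paths result = aLoop f2 paths result := by
  intro f1
  induction f1 with
  | zero =>
    intro f2 paths result h1 h2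
    have hmx : pyMaxLenA paths = 0 := by
      have := pyMaxLenA_le (fun p hp => le_trans (len_le_sumLen hp) h1)
      omega
    cases f2 with
    | zero => rfl
    | succ f2 => simp [aLoop, hmx]
  | succ f1 ih =>
    intro f2 paths result h1 h2
    by_cases hmx : pyMaxLenA paths = 0
    · cases f2 with
      | zero => simp [aLoop, hmx]
      | succ f2 => simp [aLoop, hmx]
    · have hex := pyMaxLenA_attained hmx
      have hsum := sumLen_popFirstA hmx paths hex
      cases f2 with
      | zero =>
        exfalso
        obtain ⟨p, hp, hl⟩ := hex
        have := len_le_sumLen hp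
        omega
      | succ f2 =>
        simp only [aLoop, hmx, if_false]
        exact ih f2 _ _ (by omega) (by omega)

-- pop from a decomposition whose prefix has no path of length mx
theorem popFirstA_split {mx : Nat} :
    ∀ (l₁ : List (List Int)) (p : List Int) (l₂ : List (List Int)),
      (∀ q ∈ l₁, q.length ≠ mx) → p.length = mx →
      popFirstA mx (l₁ ++ p :: l₂) = (p.getLastD 0, l₁ ++ p.dropLast :: l₂) := by
  intro l₁
  induction l₁ with
  | nil => intro p l₂ _ hp; simp [popFirstA, hp]
  | cons q qs ih =>
    intro p l₂ h1 hp
    have hq : q.length ≠ mx := h1 q (by simp)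
    simp only [List.cons_append, popFirstA, hq, if_false]
    rw [ih p l₂ (fun r hr => h1 r (by simp [hr])) hp]

-- proof-side: the effect of one level on a path
def popIf (m : Nat) (p : List Int) : List Int := if p.length = m then p.dropLast else p

theorem length_popIf_le {m : Nat} {p : List Int} (h : p.length ≤ m + 1) :
    (popIf (m + 1) p).length ≤ m := by
  unfold popIf
  split
  · rw [List.length_dropLast]; omega
  · omega

-- A-style accumulation of one level's nodes
def levelFold (m : Nat) (l : List (List Int)) (res : List Int) : List Int :=
  l.foldl (fun r p =>
    if p.length = m then (if p.getLastD 0 ∈ r then r else r ++ [p.getLastD 0]) else r) res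

theorem sumLen_append (a b : List (List Int)) :
    sumLenA (a ++ b) = sumLenA a + sumLenA b := by simp [sumLenA]

theorem sumLen_cons (p : List Int) (b : List (List Int)) :
    sumLenA (p :: b) = p.length + sumLenA b := by simp [sumLenA]

-- one round of A: pop every path of length mx+1 (in index order)
theorem aRound (mx : Nat) :
    ∀ (l₂ l₁ : List (List Int)) (res : List Int) (f : Nat),
      (∀ q ∈ l₁, q.length ≤ mx) → (∀ q ∈ l₂, q.length ≤ mx + 1) →
      sumLenA (l₁ ++ l₂) ≤ f →
      aLoop f (l₁ ++ l₂) res =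
        aLoop (sumLenA (l₁ ++ l₂.map (popIf (mx + 1)))) (l₁ ++ l₂.map (popIf (mx + 1)))
          (levelFold (mx + 1) l₂ res) := by
  intro l₂
  induction l₂ with
  | nil =>
    intro l₁ res f h1 _ hf
    simp only [List.map_nil, levelFold, List.foldl_nil]
    exact aLoop_fuel f (sumLenA (l₁ ++ [])) (l₁ ++ []) res hf le_rfl
  | cons p rest ih =>
    intro l₁ res f h1 h2 hf
    by_cases hp : p.length = mx + 1
    · have hmem : p ∈ l₁ ++ p :: rest := by simp
      have hub : ∀ q ∈ l₁ ++ p :: rest, q.length ≤ mx + 1 := by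
        intro q hq
        rcases List.mem_append.mp hq with h | h
        · have := h1 q h; omega
        · exact h2 q h
      have hmx : pyMaxLenA (l₁ ++ p :: rest) = mx + 1 := by
        have hle := pyMaxLenA_le hub
        have hge := le_pyMaxLenA hmem
        omega
      have hge : mx + 1 ≤ sumLenA (l₁ ++ p :: rest) := hp ▸ len_le_sumLen hmem
      cases f with
      | zero => omega
      | succ f =>
        have hpop := popFirstA_split l₁ p rest (fun q hq => by have := h1 q hq; omega) hp
        have step : aLoop (f + 1) (l₁ ++ p :: rest) res =
            aLoop f (l₁ ++ p.dropLast :: rest)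
              (if p.getLastD 0 ∈ res then res else res ++ [p.getLastD 0]) := by
          simp only [aLoop, hmx, hpop]
          simp
        rw [step]
        have hd : p.dropLast.length = mx := by
          rw [List.length_dropLast]; omega
        have h1' : ∀ q ∈ l₁ ++ [p.dropLast], q.length ≤ mx := by
          intro q hq
          rcases List.mem_append.mp hq with h | h
          · exact h1 q h
          · simp at h; subst h; omega
        have hf' : sumLenA ((l₁ ++ [p.dropLast]) ++ rest) ≤ f := by
          rw [sumLen_append, sumLen_append] at *
          rw [sumLen_cons] at hf
          simp only [sumLenA, List.map_cons, List.map_nil, List.sum_cons, List.sum_nil] at *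
          omega
        have := ih (l₁ ++ [p.dropLast]) (if p.getLastD 0 ∈ res then res else res ++ [p.getLastD 0]) f h1' (fun q hq => h2 q (by simp [hq])) hf'
        rw [List.append_cons l₁ p.dropLast rest, this]
        have e1 : (l₁ ++ [p.dropLast]) ++ rest.map (popIf (mx + 1)) =
            l₁ ++ (p :: rest).map (popIf (mx + 1)) := by
          simp [popIf, hp]
        have e2 : levelFold (mx + 1) rest (if p.getLastD 0 ∈ res then res else res ++ [p.getLastD 0]) =
            levelFold (mx + 1) (p :: rest) res := by
          simp [levelFold, hp]
        rw [e1, e2]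
    · have hple : p.length ≤ mx := by have := h2 p (by simp); omega
      have h1' : ∀ q ∈ l₁ ++ [p], q.length ≤ mx := by
        intro q hq
        rcases List.mem_append.mp hq with h | h
        · exact h1 q h
        · simp at h; subst h; exact hple
      have hf' : sumLenA ((l₁ ++ [p]) ++ rest) ≤ f := by
        rw [List.append_assoc]; simpa using hf
      have := ih (l₁ ++ [p]) res f h1' (fun q hq => h2 q (by simp [hq])) hf'
      rw [List.append_cons l₁ p rest, this]
      have e1 : (l₁ ++ [p]) ++ rest.map (popIf (mx + 1)) =
          l₁ ++ (p :: rest).map (popIf (mx + 1)) := by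
        simp [popIf, hp]
      have e2 : levelFold (mx + 1) rest res = levelFold (mx + 1) (p :: rest) res := by
        simp [levelFold, hp]
      rw [e1, e2]

-- proof-side name for bInner's step function (definitionally the lambda in bInner)
def bStep (d : Int) (acc : List Int × PySem.Set Int) (p : List Int) : List Int × PySem.Set Int :=
  if d ≤ (p.length : Int) then
    match PySem.List.pyGet? p (d - 1) with
    | none => acc
    | some node =>
      if PySem.Set.contains acc.2 node then acc else (acc.1 ++ [node], PySem.Set.add acc.2 node)
  else acc

theorem bInner_eq_foldl (paths : List (List Int)) (d : Int) (acc : List Int × PySem.Set Int) :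
    bInner paths d acc = paths.foldl (bStep d) acc := rfl

theorem foldl_congr_mem' {α β : Type} (l : List β) (f g : α → β → α) (init : α)
    (h : ∀ (acc : α) (x : β), x ∈ l → f acc x = g acc x) : l.foldl f init = l.foldl g init := by
  induction l generalizing init with
  | nil => rfl
  | cons x xs ih =>
    simp only [List.foldl_cons]
    rw [h init x (by simp)]
    exact ih _ (fun acc y hy => h acc y (by simp [hy]))

theorem bStep_full (mx : Nat) (p : List Int) (res : List Int) (hp : p.length = mx + 1) :
    bStep ((mx : Int) + 1) (res, res) p =
      (if p.getLastD 0 ∈ res then res else res ++ [p.getLastD 0],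
       if p.getLastD 0 ∈ res then res else res ++ [p.getLastD 0]) := by
  have hcond : ((mx : Int) + 1 ≤ (p.length : Int)) := by omega
  have hidx : PySem.List.pyGet? p ((mx : Int) + 1 - 1) = some (p.getLastD 0) := by
    have e : ((mx : Int) + 1 - 1) = ((mx : Nat) : Int) := by push_cast; ring
    rw [e, PySem.List.pyGet?_natCast]
    rw [List.getLastD_eq_getLast?, List.getLast?_eq_getElem?]
    simp [hp]
  unfold bStep
  rw [if_pos hcond, hidx]
  rw [List.getLastD_eq_getLast?]
  by_cases hmem : p.getLast?.getD 0 ∈ res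
  · simp [hmem]
  · simp [hmem]

theorem bStep_short (mx : Nat) (p : List Int) (acc : List Int × PySem.Set Int)
    (hp : p.length ≤ mx) : bStep ((mx : Int) + 1) acc p = acc := by
  unfold bStep
  rw [if_neg (by omega)]

-- bInner at the top level mx+1, started on a synced pair, is levelFold
theorem bInner_top (mx : Nat) (paths : List (List Int)) (res : List Int)
    (h : ∀ p ∈ paths, p.length ≤ mx + 1) :
    bInner paths ((mx : Int) + 1) (res, res) = (levelFold (mx + 1) paths res, levelFold (mx + 1) paths res) := by
  induction paths generalizing res with
  | nil => simp [bInner, levelFold]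
  | cons p rest ih =>
    have hrest : ∀ q ∈ rest, q.length ≤ mx + 1 := fun q hq => h q (List.mem_cons_of_mem _ hq)
    rw [bInner_eq_foldl, List.foldl_cons, ← bInner_eq_foldl]
    by_cases hp : p.length = mx + 1
    · rw [bStep_full mx p res hp, ih _ hrest]
      have e : levelFold (mx + 1) (p :: rest) res =
          levelFold (mx + 1) rest (if p.getLastD 0 ∈ res then res else res ++ [p.getLastD 0]) := by
        simp [levelFold, hp]
      rw [e]
    · have hple : p.length ≤ mx := by have := h p (by simp); omega
      rw [bStep_short mx p (res, res) hple, ih _ hrest]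
      have e : levelFold (mx + 1) (p :: rest) res = levelFold (mx + 1) rest res := by
        simp [levelFold, hp]
      rw [e]

theorem bStep_popIf (mx : Nat) (d : Int) (h1 : 1 ≤ d) (h2 : d ≤ (mx : Int))
    (acc : List Int × PySem.Set Int) (p : List Int) :
    bStep d acc (popIf (mx + 1) p) = bStep d acc p := by
  by_cases hp : p.length = mx + 1
  · have e : popIf (mx + 1) p = p.dropLast := by simp [popIf, hp]
    rw [e]
    have hld : p.dropLast.length = mx := by rw [List.length_dropLast]; omega
    have hc1 : d ≤ (p.dropLast.length : Int) := by omega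
    have hc2 : d ≤ (p.length : Int) := by omega
    have hidx : PySem.List.pyGet? p.dropLast (d - 1) = PySem.List.pyGet? p (d - 1) := by
      have hlt : (d - 1).toNat < p.length - 1 := by omega
      rw [PySem.List.pyGet?_of_nonneg p.dropLast (by omega), PySem.List.pyGet?_of_nonneg p (by omega),
        List.getElem?_dropLast, if_pos hlt]
    unfold bStep
    rw [if_pos hc1, if_pos hc2, hidx]
  · simp [popIf, hp]

-- levels below mx+1 do not see the popped elements
theorem bInner_popIf (mx : Nat) (paths : List (List Int)) (d : Int)
    (h1 : 1 ≤ d) (h2 : d ≤ (mx : Int)) (acc : List Int × PySem.Set Int) :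
    bInner (paths.map (popIf (mx + 1))) d acc = bInner paths d acc := by
  rw [bInner_eq_foldl, bInner_eq_foldl, List.foldl_map]
  exact foldl_congr_mem' paths _ _ acc (fun a p _ => bStep_popIf mx d h1 h2 a p)

theorem main_lemma : ∀ (mx : Nat) (paths : List (List Int)) (res : List Int) (f : Nat),
    (∀ p ∈ paths, p.length ≤ mx) → sumLenA paths ≤ f →
    aLoop f paths res =
      ((PySem.List.pyRange (mx : Int) 0 (-1)).foldl (fun acc d => bInner paths d acc) (res, res)).1 := by
  intro mx
  induction mx with
  | zero =>
    intro paths res f h hf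
    rw [PySem.List.pyRange_neg_one_eq_nil (by norm_num)]
    simp only [List.foldl_nil]
    have hmx : pyMaxLenA paths = 0 := by have := pyMaxLenA_le h; omega
    cases f with
    | zero => rfl
    | succ f => simp [aLoop, hmx]
  | succ mx ih =>
    intro paths res f h hf
    have hcons : PySem.List.pyRange ((mx + 1 : Nat) : Int) 0 (-1)
        = ((mx : Int) + 1) :: PySem.List.pyRange (mx : Int) 0 (-1) := by
      have e1 : ((mx + 1 : Nat) : Int) = (mx : Int) + 1 := by push_cast; ring
      rw [e1, PySem.List.pyRange_neg_one_cons (by omega)]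
      norm_num
    rw [hcons]
    simp only [List.foldl_cons]
    have hall1 : ∀ p ∈ paths, p.length ≤ mx + 1 := h
    rw [bInner_top mx paths res hall1]
    have h' : ∀ p ∈ paths.map (popIf (mx + 1)), p.length ≤ mx := by
      intro p hp
      obtain ⟨q, hq, rfl⟩ := List.mem_map.mp hp
      exact length_popIf_le (h q hq)
    have hA : aLoop f paths res =
        aLoop (sumLenA (paths.map (popIf (mx + 1)))) (paths.map (popIf (mx + 1)))
          (levelFold (mx + 1) paths res) := by
      have := aRound mx paths [] res f (by simp) h (by simpa using hf)
      simpa using this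
    have hB := ih (paths.map (popIf (mx + 1))) (levelFold (mx + 1) paths res)
      (sumLenA (paths.map (popIf (mx + 1)))) h' le_rfl
    rw [hA, hB]
    congr 1
    exact foldl_congr_mem' _ _ _ _ (fun acc d hd => by
      have hm := (PySem.List.mem_pyRange_neg_one).mp hd
      exact bInner_popIf mx paths d (by omega) (by omega) acc)

-- ===== VERDICT (by name: the statement is the Claim_ definition above) =====
theorem paths_to_node_order_py_spec : Claim_equal_paths_to_node_order_py := by
  intro paths _ _
  unfold Spec_paths_to_node_order_py paths_to_node_order_py paths_to_node_order_py_alt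
  have hb : bMaxLen paths = pyMaxLenA paths := by cases paths <;> rfl
  rw [hb]
  have : (([] : List Int), (PySem.Set.empty : PySem.Set Int)) = (([] : List Int), ([] : List Int)) := rfl
  rw [this]
  exact main_lemma (pyMaxLenA paths) paths [] _ (fun p hp => le_pyMaxLenA hp) (by omega)
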